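-- pv_equiv track=rewrite | github.com/ShabalalaWATP/VRAgent | backend/services/contextual_risk_scoring.py | _classify_vulnerability_type
-- ===== SOURCE A (Python) =====
-- def _classify_vulnerability_type(combined: str) -> str:
--     """
--     Classify vulnerability into a category for default factor assignment.
--     """
--     if any(x in combined for x in ["sql injection", "sqli", "sql-injection"]):
--         return "sqli"
--     elif any(x in combined for x in ["stored xss", "persistent xss"]):
--         return "xss_stored"
--     elif any(x in combined for x in ["reflected xss", "xss", "cross-site scripting"]):
--         return "xss_reflected"
--     elif any(x in combined for x in ["ssrf", "server-side request"]):
--         return "ssrf"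
--     elif any(x in combined for x in ["rce", "remote code", "command injection"]):
--         return "rce"
--     elif any(x in combined for x in ["idor", "insecure direct object"]):
--         return "idor"
--     elif any(x in combined for x in ["auth bypass", "authentication bypass"]):
--         return "auth_bypass"
--     elif any(x in combined for x in ["xxe", "xml external entity"]):
--         return "xxe"
--     elif any(x in combined for x in ["deserialization", "unserialize"]):
--         return "deserialization"
--     elif any(x in combined for x in ["race condition", "toctou"]):
--         return "race_condition"
--     elif any(x in combined for x in ["path traversal", "directory traversal", "lfi"]):
--         return "path_traversal"
--     elif any(x in combined for x in ["csrf", "cross-site request forgery"]):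
--         return "csrf"
--     elif any(x in combined for x in ["open redirect"]):
--         return "open_redirect"
--     elif any(x in combined for x in ["buffer overflow", "stack overflow", "heap overflow"]):
--         return "buffer_overflow"
--     elif any(x in combined for x in ["dos", "denial of service", "resource exhaustion"]):
--         return "dos"
--     elif any(x in combined for x in ["clickjacking", "ui redressing"]):
--         return "clickjacking"
--     else:
--         return "unknown"
-- ===== SOURCE B (Python) =====
-- # Flat pattern -> priority-rank dict; B scans ALL patterns once, collects the
-- # ranks of every matching pattern, and returns the label of the minimal rank
-- # (no early return / no branch ladder).
-- _PATTERN_RANK = {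
--     "sql injection": 0, "sqli": 0, "sql-injection": 0,
--     "stored xss": 1, "persistent xss": 1,
--     "reflected xss": 2, "xss": 2, "cross-site scripting": 2,
--     "ssrf": 3, "server-side request": 3,
--     "rce": 4, "remote code": 4, "command injection": 4,
--     "idor": 5, "insecure direct object": 5,
--     "auth bypass": 6, "authentication bypass": 6,
--     "xxe": 7, "xml external entity": 7,
--     "deserialization": 8, "unserialize": 8,
--     "race condition": 9, "toctou": 9,
--     "path traversal": 10, "directory traversal": 10, "lfi": 10,
--     "csrf": 11, "cross-site request forgery": 11,
--     "open redirect": 12,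
--     "buffer overflow": 13, "stack overflow": 13, "heap overflow": 13,
--     "dos": 14, "denial of service": 14, "resource exhaustion": 14,
--     "clickjacking": 15, "ui redressing": 15,
-- }
--
-- _LABELS = [
--     "sqli", "xss_stored", "xss_reflected", "ssrf", "rce", "idor",
--     "auth_bypass", "xxe", "deserialization", "race_condition",
--     "path_traversal", "csrf", "open_redirect", "buffer_overflow",
--     "dos", "clickjacking",
-- ]
--
--
-- def _classify_vulnerability_type(combined: str) -> str:
--     best = min((rank for pat, rank in _PATTERN_RANK.items() if pat in combined),
--                default=None)
--     return "unknown" if best is None else _LABELS[best]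
-- ===== Notes on version B (the rewrite author's own statement) =====
-- stated objective: alternative
-- what changed: Instead of an ordered 16-branch first-match ladder, B scans the full flat pattern->rank dict once, collects the ranks of all matching patterns, and selects the label of the minimum rank.
import Mathlib
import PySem

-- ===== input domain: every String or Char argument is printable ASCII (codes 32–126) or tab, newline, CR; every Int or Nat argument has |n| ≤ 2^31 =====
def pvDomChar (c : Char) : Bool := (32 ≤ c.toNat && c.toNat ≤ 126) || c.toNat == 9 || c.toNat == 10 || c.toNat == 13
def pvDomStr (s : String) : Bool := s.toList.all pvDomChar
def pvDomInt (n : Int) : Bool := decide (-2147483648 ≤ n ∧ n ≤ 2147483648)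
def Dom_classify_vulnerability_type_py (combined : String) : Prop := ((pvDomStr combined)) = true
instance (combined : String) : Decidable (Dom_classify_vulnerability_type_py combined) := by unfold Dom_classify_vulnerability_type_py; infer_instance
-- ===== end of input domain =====

-- B replaces A's ordered if/elif ladder by one full scan of a flat pattern->rank map plus a minimum-rank selection (alternative, same cost).


-- ===== PORT A =====
-- literal transliteration of the if/elif ladder; 'any(x in combined for x in [...])' = List.any with PySem.Str.isIn
def classify_vulnerability_type_py (combined : String) : String :=
  if ["sql injection", "sqli", "sql-injection"].any (fun x => PySem.Str.isIn x combined) then "sqli"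
  else if ["stored xss", "persistent xss"].any (fun x => PySem.Str.isIn x combined) then "xss_stored"
  else if ["reflected xss", "xss", "cross-site scripting"].any (fun x => PySem.Str.isIn x combined) then "xss_reflected"
  else if ["ssrf", "server-side request"].any (fun x => PySem.Str.isIn x combined) then "ssrf"
  else if ["rce", "remote code", "command injection"].any (fun x => PySem.Str.isIn x combined) then "rce"
  else if ["idor", "insecure direct object"].any (fun x => PySem.Str.isIn x combined) then "idor"
  else if ["auth bypass", "authentication bypass"].any (fun x => PySem.Str.isIn x combined) then "auth_bypass"
  else if ["xxe", "xml external entity"].any (fun x => PySem.Str.isIn x combined) then "xxe"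
  else if ["deserialization", "unserialize"].any (fun x => PySem.Str.isIn x combined) then "deserialization"
  else if ["race condition", "toctou"].any (fun x => PySem.Str.isIn x combined) then "race_condition"
  else if ["path traversal", "directory traversal", "lfi"].any (fun x => PySem.Str.isIn x combined) then "path_traversal"
  else if ["csrf", "cross-site request forgery"].any (fun x => PySem.Str.isIn x combined) then "csrf"
  else if ["open redirect"].any (fun x => PySem.Str.isIn x combined) then "open_redirect"
  else if ["buffer overflow", "stack overflow", "heap overflow"].any (fun x => PySem.Str.isIn x combined) then "buffer_overflow"
  else if ["dos", "denial of service", "resource exhaustion"].any (fun x => PySem.Str.isIn x combined) then "dos"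
  else if ["clickjacking", "ui redressing"].any (fun x => PySem.Str.isIn x combined) then "clickjacking"
  else "unknown"

-- ===== PORT B =====
-- Source B's flat _PATTERN_RANK dict in insertion order (keys are distinct, so the assoc list is the dict's items())
def pvPatternRank : List (String × Nat) :=
  [("sql injection", 0), ("sqli", 0), ("sql-injection", 0),
   ("stored xss", 1), ("persistent xss", 1),
   ("reflected xss", 2), ("xss", 2), ("cross-site scripting", 2),
   ("ssrf", 3), ("server-side request", 3),
   ("rce", 4), ("remote code", 4), ("command injection", 4),
   ("idor", 5), ("insecure direct object", 5),
   ("auth bypass", 6), ("authentication bypass", 6),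
   ("xxe", 7), ("xml external entity", 7),
   ("deserialization", 8), ("unserialize", 8),
   ("race condition", 9), ("toctou", 9),
   ("path traversal", 10), ("directory traversal", 10), ("lfi", 10),
   ("csrf", 11), ("cross-site request forgery", 11),
   ("open redirect", 12),
   ("buffer overflow", 13), ("stack overflow", 13), ("heap overflow", 13),
   ("dos", 14), ("denial of service", 14), ("resource exhaustion", 14),
   ("clickjacking", 15), ("ui redressing", 15)]

-- Source B's _LABELS
def pvLabels : List String :=
  ["sqli", "xss_stored", "xss_reflected", "ssrf", "rce", "idor",
   "auth_bypass", "xxe", "deserialization", "race_condition",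
   "path_traversal", "csrf", "open_redirect", "buffer_overflow",
   "dos", "clickjacking"]

-- min(generator, default=None) over the ranks of matching patterns, then _LABELS[best]
-- (every rank in the table is < 16 = pvLabels.length, so the list index is in range)
def classify_vulnerability_type_py_alt (combined : String) : String :=
  match ((pvPatternRank.filter (fun pr => PySem.Str.isIn pr.1 combined)).map (·.2)).min? with
  | none => "unknown"
  | some r => pvLabels.getD r "unknown"

-- ===== PRECONDITION & SPEC =====
def Spec_classify_vulnerability_type_py (combined : String) (out : String) : Prop := out = classify_vulnerability_type_py_alt combined
instance (combined : String) (out : String) : Decidable (Spec_classify_vulnerability_type_py combined out) := by unfold Spec_classify_vulnerability_type_py; infer_instance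

-- ===== CLAIM =====
def Claim_equal_classify_vulnerability_type_py : Prop := ∀ (combined : String), Dom_classify_vulnerability_type_py combined → Spec_classify_vulnerability_type_py combined (classify_vulnerability_type_py combined)

-- ===== LEMMAS AND PROOFS =====

-- the 16 pattern groups of A's ladder, in ladder order (used only by the proofs)
def pvGroups : List (List String) :=
  [["sql injection", "sqli", "sql-injection"],
   ["stored xss", "persistent xss"],
   ["reflected xss", "xss", "cross-site scripting"],
   ["ssrf", "server-side request"],
   ["rce", "remote code", "command injection"],
   ["idor", "insecure direct object"],
   ["auth bypass", "authentication bypass"],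
   ["xxe", "xml external entity"],
   ["deserialization", "unserialize"],
   ["race condition", "toctou"],
   ["path traversal", "directory traversal", "lfi"],
   ["csrf", "cross-site request forgery"],
   ["open redirect"],
   ["buffer overflow", "stack overflow", "heap overflow"],
   ["dos", "denial of service", "resource exhaustion"],
   ["clickjacking", "ui redressing"]]

-- groups flattened with ranks k, k+1, ...
def pvFlat : List (List String) → Nat → List (String × Nat)
  | [], _ => []
  | ps :: rest, k => ps.map (fun p => (p, k)) ++ pvFlat rest (k + 1)

theorem pvPatternRank_eq_flat : pvPatternRank = pvFlat pvGroups 0 := rfl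

-- the ranks B collects, computed group by group
def pvRanksOf (c : String) : List (List String) → Nat → List Nat
  | [], _ => []
  | ps :: rest, k =>
      (ps.filter (fun p => PySem.Str.isIn p c)).map (fun _ => k) ++ pvRanksOf c rest (k + 1)

theorem pvRanks_eq (c : String) : ∀ (gs : List (List String)) (k : Nat),
    ((pvFlat gs k).filter (fun pr => PySem.Str.isIn pr.1 c)).map (·.2) = pvRanksOf c gs k := by
  intro gs
  induction gs with
  | nil => intro k; rfl
  | cons ps rest ih =>
      intro k
      simp only [pvFlat, pvRanksOf, List.filter_append, List.map_append, ih]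
      congr 1
      rw [List.filter_map, List.map_map]
      rfl

theorem pvRanksOf_ge (c : String) : ∀ (gs : List (List String)) (k x : Nat),
    x ∈ pvRanksOf c gs k → k ≤ x := by
  intro gs
  induction gs with
  | nil => intro k x h; simp [pvRanksOf] at h
  | cons ps rest ih =>
      intro k x h
      simp only [pvRanksOf, List.mem_append, List.mem_map] at h
      rcases h with ⟨_, _, rfl⟩ | h
      · exact le_refl k
      · exact Nat.le_of_succ_le (ih (k + 1) x h)

-- the rank A's ladder selects: first group that matches
def pvFirst (c : String) : List (List String) → Nat → Option Nat
  | [], _ => none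
  | ps :: rest, k =>
      if ps.any (fun x => PySem.Str.isIn x c) then some k else pvFirst c rest (k + 1)

-- A's ladder is exactly 'label of the first matching group'
theorem pvLadder_eq (c : String) :
    classify_vulnerability_type_py c =
      (match pvFirst c pvGroups 0 with
       | none => "unknown"
       | some r => pvLabels.getD r "unknown") := by
  unfold classify_vulnerability_type_py pvGroups
  simp only [pvFirst, apply_ite
    (fun o => match o with
              | none => "unknown"
              | some r => pvLabels.getD r "unknown" : Option Nat → String)]
  rfl

-- if the head group matches, the minimum rank is its rank k
theorem pvStep_pos (c : String) (ps : List String) (rest : List (List String)) (k : Nat)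
    (h : ps.any (fun x => PySem.Str.isIn x c) = true) :
    (pvRanksOf c (ps :: rest) k).min? = some k := by
  rcases List.any_eq_true.mp h with ⟨p, hp, hpc⟩
  apply List.min?_eq_some_iff.mpr
  constructor
  · simp only [pvRanksOf]
    exact List.mem_append_left _ (List.mem_map_of_mem (List.mem_filter.mpr ⟨hp, hpc⟩))
  · intro b hb
    simp only [pvRanksOf, List.mem_append, List.mem_map] at hb
    rcases hb with ⟨_, _, rfl⟩ | hb
    · exact le_refl k
    · exact Nat.le_of_succ_le (pvRanksOf_ge c rest (k + 1) b hb)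

-- if the head group does not match, it contributes nothing
theorem pvStep_neg (c : String) (ps : List String) (rest : List (List String)) (k : Nat)
    (h : ps.any (fun x => PySem.Str.isIn x c) = false) :
    pvRanksOf c (ps :: rest) k = pvRanksOf c rest (k + 1) := by
  have hnil : ps.filter (fun p => PySem.Str.isIn p c) = [] :=
    List.filter_eq_nil_iff.mpr (fun p hp => by
      rw [List.any_eq_false] at h; exact h p hp)
  simp only [pvRanksOf, hnil, List.map_nil, List.nil_append]

-- the minimum of the collected ranks is the rank of the first matching group
theorem pvMin_eq (c : String) : ∀ (gs : List (List String)) (k : Nat),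
    (pvRanksOf c gs k).min? = pvFirst c gs k := by
  intro gs
  induction gs with
  | nil => intro k; rfl
  | cons ps rest ih =>
      intro k
      by_cases h : ps.any (fun x => PySem.Str.isIn x c) = true
      · rw [pvStep_pos c ps rest k h, pvFirst, if_pos h]
      · rw [pvStep_neg c ps rest k ((Bool.not_eq_true _).mp h), pvFirst, if_neg h]
        exact ih (k + 1)

-- ===== VERDICT =====
theorem classify_vulnerability_type_py_spec : Claim_equal_classify_vulnerability_type_py := by
  intro c _
  unfold Spec_classify_vulnerability_type_py classify_vulnerability_type_py_alt
  rw [pvPatternRank_eq_flat, pvRanks_eq, pvMin_eq, pvLadder_eq]
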